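-- pv_equiv track=rewrite | github.com/Introduccion-a-la-IA/Algoritmos-de-busqueda | main.py | encontrar_puntos_especiales
-- ===== SOURCE A (Python) =====
-- def encontrar_puntos_especiales(matriz):
--     inicio = None
--     destino = None
--
--     for i in range(len(matriz)):
--         for j in range(len(matriz[i])):
--             if matriz[i][j] == 2:
--                 inicio = (i, j)
--             elif matriz[i][j] == 3:
--                 destino = (i, j)
--
--     return inicio, destino
-- ===== SOURCE B (Python) =====
-- def encontrar_puntos_especiales(matriz):
--     inicio = None
--     destino = None
--     for i in range(len(matriz) - 1, -1, -1):
--         fila = matriz[i]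
--         for j in range(len(fila) - 1, -1, -1):
--             v = fila[j]
--             if inicio is None and v == 2:
--                 inicio = (i, j)
--             elif destino is None and v == 3:
--                 destino = (i, j)
--             if inicio is not None and destino is not None:
--                 return inicio, destino
--     return inicio, destino
-- ===== Notes on version B (the rewrite author's own statement) =====
-- stated objective: alternative
-- what changed: Scans the matrix backwards (rows and columns from last to first) with sticky first-seen assignment and an early exit as soon as both points are found, instead of A's full forward sweep that keeps overwriting with the latest match.
import Mathlib
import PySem

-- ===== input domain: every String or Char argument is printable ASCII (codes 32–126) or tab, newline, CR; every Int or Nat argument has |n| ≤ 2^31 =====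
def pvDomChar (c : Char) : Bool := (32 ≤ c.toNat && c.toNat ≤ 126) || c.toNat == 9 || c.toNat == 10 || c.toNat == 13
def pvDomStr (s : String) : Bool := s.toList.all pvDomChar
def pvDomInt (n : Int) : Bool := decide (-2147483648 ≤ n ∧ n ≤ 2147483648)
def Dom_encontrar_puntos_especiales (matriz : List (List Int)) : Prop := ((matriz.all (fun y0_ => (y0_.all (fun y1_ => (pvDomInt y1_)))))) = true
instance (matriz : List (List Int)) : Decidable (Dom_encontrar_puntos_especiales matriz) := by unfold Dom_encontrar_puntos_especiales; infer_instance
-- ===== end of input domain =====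

-- B scans the matrix backwards with sticky first-seen assignment and early exit, instead of A's full forward overwrite sweep; same return value, proved equal on all inputs.


-- ===== PORT A =====
-- forward sweep: for i in range(len(matriz)): for j in range(len(matriz[i])): overwrite on match
def encontrar_puntos_especiales (matriz : List (List Int)) :
    (Option (Int × Int)) × (Option (Int × Int)) :=
  (PySem.List.pyRange 0 (matriz.length : Int) 1).foldl
    (fun st i =>
      let fila := PySem.List.pyGetD matriz i []
      (PySem.List.pyRange 0 (fila.length : Int) 1).foldl
        (fun st2 j =>
          if PySem.List.pyGetD fila j 0 = 2 then (some (i, j), st2.2)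
          else if PySem.List.pyGetD fila j 0 = 3 then (st2.1, some (i, j))
          else st2) st)
    (none, none)

-- ===== PORT B =====
-- inner loop: for j in range(len(fila)-1, -1, -1), with early return when both are set
def pvCellLoopB (fila : List Int) (i : Int)
    (st : (Option (Int × Int)) × (Option (Int × Int))) :
    List Int → (Option (Int × Int)) × (Option (Int × Int))
  | [] => st
  | j :: js =>
    let v := PySem.List.pyGetD fila j 0
    let st' := if st.1 = none ∧ v = 2 then (some (i, j), st.2)
               else if st.2 = none ∧ v = 3 then (st.1, some (i, j))
               else st
    if st'.1.isSome ∧ st'.2.isSome then st' else pvCellLoopB fila i st' js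

-- outer loop: for i in range(len(matriz)-1, -1, -1), stopping once the inner loop returned early
def pvRowLoopB (matriz : List (List Int))
    (st : (Option (Int × Int)) × (Option (Int × Int))) :
    List Int → (Option (Int × Int)) × (Option (Int × Int))
  | [] => st
  | i :: is =>
    let fila := PySem.List.pyGetD matriz i []
    let st' := pvCellLoopB fila i st (PySem.List.pyRange ((fila.length : Int) - 1) (-1) (-1))
    if st'.1.isSome ∧ st'.2.isSome then st' else pvRowLoopB matriz st' is

def encontrar_puntos_especiales_alt (matriz : List (List Int)) :
    (Option (Int × Int)) × (Option (Int × Int)) :=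
  pvRowLoopB matriz (none, none) (PySem.List.pyRange ((matriz.length : Int) - 1) (-1) (-1))

-- ===== PRECONDITION & SPEC =====
def Spec_encontrar_puntos_especiales (matriz : List (List Int)) (out : (Option (Int × Int)) × (Option (Int × Int))) : Prop := out = encontrar_puntos_especiales_alt matriz
instance (matriz : List (List Int)) (out : (Option (Int × Int)) × (Option (Int × Int))) : Decidable (Spec_encontrar_puntos_especiales matriz out) := by unfold Spec_encontrar_puntos_especiales; infer_instance

-- ===== CLAIM (what is proved, stated in full; the proofs are below) =====
def Claim_equal_encontrar_puntos_especiales : Prop := ∀ (matriz : List (List Int)), Dom_encontrar_puntos_especiales matriz → Spec_encontrar_puntos_especiales matriz (encontrar_puntos_especiales matriz)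

-- ===== LEMMAS AND PROOFS =====

-- first-some over a list of candidates (first match wins)
def pvOrMap (h : Int → Option (Int × Int)) : List Int → Option (Int × Int)
  | [] => none
  | x :: xs => (h x).or (pvOrMap h xs)

def pvF2 (fila : List Int) (i j : Int) : Option (Int × Int) :=
  if PySem.List.pyGetD fila j 0 = 2 then some (i, j) else none

def pvF3 (fila : List Int) (i j : Int) : Option (Int × Int) :=
  if PySem.List.pyGetD fila j 0 = 3 then some (i, j) else none

lemma pvOrMap_append (h : Int → Option (Int × Int)) (xs ys : List Int) :
    pvOrMap h (xs ++ ys) = (pvOrMap h xs).or (pvOrMap h ys) := by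
  induction xs with
  | nil => simp [pvOrMap]
  | cons x xs ih => simp [pvOrMap, ih, Option.or_assoc]

-- A's inner loop keeps the LAST match: it is the first match of the reversed column list
lemma pvInnerA_char (fila : List Int) (i : Int) (js : List Int)
    (a b : Option (Int × Int)) :
    js.foldl
      (fun st2 j =>
        if PySem.List.pyGetD fila j 0 = 2 then (some (i, j), st2.2)
        else if PySem.List.pyGetD fila j 0 = 3 then (st2.1, some (i, j))
        else st2) (a, b)
      = ((pvOrMap (pvF2 fila i) js.reverse).or a, (pvOrMap (pvF3 fila i) js.reverse).or b) := by
  induction js generalizing a b with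
  | nil => simp [pvOrMap]
  | cons j js ih =>
    have hstep : (fun st2 : (Option (Int × Int)) × (Option (Int × Int)) =>
        if PySem.List.pyGetD fila j 0 = 2 then (some (i, j), st2.2)
        else if PySem.List.pyGetD fila j 0 = 3 then (st2.1, some (i, j))
        else st2) (a, b) = ((pvF2 fila i j).or a, (pvF3 fila i j).or b) := by
      simp only [pvF2, pvF3]
      split_ifs with h1 h2 <;> simp_all
    simp only [List.foldl_cons, hstep, ih, List.reverse_cons, pvOrMap_append,
      pvOrMap, Option.or_none, Option.or_assoc]

-- A's outer loop likewise keeps the last row's match first in reverse order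
lemma pvOuterA_char (matriz : List (List Int)) (is : List Int)
    (a b : Option (Int × Int)) :
    is.foldl
      (fun st i =>
        let fila := PySem.List.pyGetD matriz i []
        (PySem.List.pyRange 0 (fila.length : Int) 1).foldl
          (fun st2 j =>
            if PySem.List.pyGetD fila j 0 = 2 then (some (i, j), st2.2)
            else if PySem.List.pyGetD fila j 0 = 3 then (st2.1, some (i, j))
            else st2) st) (a, b)
      = ((pvOrMap (fun i => pvOrMap (pvF2 (PySem.List.pyGetD matriz i []) i)
            (PySem.List.pyRange 0 ((PySem.List.pyGetD matriz i []).length : Int) 1).reverse) is.reverse).or a,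
         (pvOrMap (fun i => pvOrMap (pvF3 (PySem.List.pyGetD matriz i []) i)
            (PySem.List.pyRange 0 ((PySem.List.pyGetD matriz i []).length : Int) 1).reverse) is.reverse).or b) := by
  induction is generalizing a b with
  | nil => simp [pvOrMap]
  | cons i is ih =>
    simp only [List.foldl_cons, pvInnerA_char, ih, List.reverse_cons, pvOrMap_append,
      pvOrMap, Option.or_none, Option.or_assoc]

-- B's inner loop: sticky assignment = Option.or with first match; early exit changes nothing
lemma pvCellLoopB_char (fila : List Int) (i : Int) (js : List Int)
    (st : (Option (Int × Int)) × (Option (Int × Int))) :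
    pvCellLoopB fila i st js = (st.1.or (pvOrMap (pvF2 fila i) js), st.2.or (pvOrMap (pvF3 fila i) js)) := by
  induction js generalizing st with
  | nil => simp [pvCellLoopB, pvOrMap]
  | cons j js ih =>
    obtain ⟨a, b⟩ := st
    have hstep : (if a = none ∧ PySem.List.pyGetD fila j 0 = 2 then ((some (i, j) : Option (Int × Int)), b)
               else if b = none ∧ PySem.List.pyGetD fila j 0 = 3 then (a, some (i, j))
               else (a, b)) = (a.or (pvF2 fila i j), b.or (pvF3 fila i j)) := by
      simp only [pvF2, pvF3]
      rcases a with _ | x <;> rcases b with _ | y <;> split_ifs <;> simp_all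
    rw [pvCellLoopB]
    simp only [hstep]
    split_ifs with hdone
    · -- both components are some; appending further candidates changes nothing
      obtain ⟨h1, h2⟩ := hdone
      rcases h1' : (Option.or a (pvF2 fila i j)) with _ | x
      · rw [h1'] at h1; simp at h1
      · rcases h2' : (Option.or b (pvF3 fila i j)) with _ | y
        · rw [h2'] at h2; simp at h2
        · simp [pvOrMap, ← Option.or_assoc, h1', h2']
    · rw [ih]
      simp [pvOrMap, Option.or_assoc]

-- B's outer loop characterisation
lemma pvRowLoopB_char (matriz : List (List Int)) (is : List Int)
    (st : (Option (Int × Int)) × (Option (Int × Int))) :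
    pvRowLoopB matriz st is =
      (st.1.or (pvOrMap (fun i => pvOrMap (pvF2 (PySem.List.pyGetD matriz i []) i)
          (PySem.List.pyRange (((PySem.List.pyGetD matriz i []).length : Int) - 1) (-1) (-1))) is),
       st.2.or (pvOrMap (fun i => pvOrMap (pvF3 (PySem.List.pyGetD matriz i []) i)
          (PySem.List.pyRange (((PySem.List.pyGetD matriz i []).length : Int) - 1) (-1) (-1))) is)) := by
  induction is generalizing st with
  | nil => simp [pvRowLoopB, pvOrMap]
  | cons i is ih =>
    rw [pvRowLoopB]
    simp only [pvCellLoopB_char]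
    split_ifs with hdone
    · obtain ⟨h1, h2⟩ := hdone
      rcases h1' : (Option.or st.1 _) with _ | x
      · rw [h1'] at h1; simp at h1
      · rcases h2' : (Option.or st.2 _) with _ | y
        · rw [h2'] at h2; simp at h2
        · simp only [pvOrMap, ← Option.or_assoc, h1', h2']
          simp
    · rw [ih]
      simp [pvOrMap, Option.or_assoc]

-- the countdown range is the reverse of the count-up range
lemma pvRange_rev (n : Int) :
    PySem.List.pyRange (n - 1) (-1) (-1) = (PySem.List.pyRange 0 n 1).reverse := by
  have := PySem.List.pyRange_neg_one_eq_reverse (n - 1) (-1)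
  simpa using this

-- ===== VERDICT (by name: the statement is the Claim_ definition above) =====
theorem encontrar_puntos_especiales_spec : Claim_equal_encontrar_puntos_especiales := by
  intro matriz _
  unfold Spec_encontrar_puntos_especiales
  unfold encontrar_puntos_especiales encontrar_puntos_especiales_alt
  rw [pvOuterA_char, pvRowLoopB_char]
  simp only [Option.or_none, Option.none_or, pvRange_rev]
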